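-- pv_equiv track=rewrite | github.com/PB4trA/Coderbyte-Easy | ChangingSequence.py | ChangingSequence
-- ===== SOURCE A (Python) =====
-- def ChangingSequence(arr):
--     increasing = False
--     decreasing = False
--
--     for i in range(1, len(arr)):
--         if arr[i] > arr[i - 1]:
--             increasing = True
--         elif arr[i] < arr[i - 1]:
--             decreasing = True
--
--         if increasing and decreasing:
--             return i - 1
--
--     return -1
-- ===== SOURCE B (Python) =====
-- def ChangingSequence(arr):
--     first_up = next((i for i in range(1, len(arr)) if arr[i] > arr[i - 1]), None)
--     first_down = next((i for i in range(1, len(arr)) if arr[i] < arr[i - 1]), None)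
--     if first_up is None or first_down is None:
--         return -1
--     return max(first_up, first_down) - 1
-- ===== Notes on version B (the rewrite author's own statement) =====
-- stated objective: alternative
-- what changed: Replaced the single stateful early-exit loop carrying increasing/decreasing flags by two independent whole-array scans that find the first rise index and the first fall index, combined with max(...)-1.
import Mathlib
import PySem

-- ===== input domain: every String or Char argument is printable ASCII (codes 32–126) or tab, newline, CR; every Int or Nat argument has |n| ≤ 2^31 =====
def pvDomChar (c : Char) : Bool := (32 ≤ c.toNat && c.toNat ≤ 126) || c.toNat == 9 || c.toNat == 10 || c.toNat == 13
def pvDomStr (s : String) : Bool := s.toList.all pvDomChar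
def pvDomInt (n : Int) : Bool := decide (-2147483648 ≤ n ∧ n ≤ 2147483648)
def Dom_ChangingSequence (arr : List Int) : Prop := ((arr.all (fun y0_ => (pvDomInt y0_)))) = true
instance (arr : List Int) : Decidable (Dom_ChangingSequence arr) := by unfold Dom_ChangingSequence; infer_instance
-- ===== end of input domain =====

-- B replaces A's single flag-carrying early-exit loop by two independent first-index scans
-- (first rise, first fall) combined with max(...)-1; alternative decomposition, same cost.

-- ===== PORT A =====
-- the for-loop over range(1, len(arr)) with the two flags and the early return
def pvLoopA (arr : List Int) : List Int → Bool → Bool → Int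
  | [], _, _ => -1
  | i :: rest, increasing, decreasing =>
    let increasing := if (PySem.List.pyGet? arr i).getD 0 > (PySem.List.pyGet? arr (i - 1)).getD 0 then true else increasing
    let decreasing := if (PySem.List.pyGet? arr i).getD 0 > (PySem.List.pyGet? arr (i - 1)).getD 0 then decreasing
      else if (PySem.List.pyGet? arr i).getD 0 < (PySem.List.pyGet? arr (i - 1)).getD 0 then true else decreasing
    if increasing && decreasing then i - 1 else pvLoopA arr rest increasing decreasing

def ChangingSequence (arr : List Int) : Int :=
  pvLoopA arr (PySem.List.pyRange 1 (PySem.List.len arr) 1) false false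

-- ===== PORT B =====
-- next((i for i in idxs if p i), None)
def pvFirstIdx (p : Int → Bool) : List Int → Option Int
  | [] => none
  | i :: rest => if p i then some i else pvFirstIdx p rest

def ChangingSequence_alt (arr : List Int) : Int :=
  let firstUp := pvFirstIdx (fun i => (PySem.List.pyGet? arr i).getD 0 > (PySem.List.pyGet? arr (i - 1)).getD 0)
      (PySem.List.pyRange 1 (PySem.List.len arr) 1)
  let firstDown := pvFirstIdx (fun i => (PySem.List.pyGet? arr i).getD 0 < (PySem.List.pyGet? arr (i - 1)).getD 0)
      (PySem.List.pyRange 1 (PySem.List.len arr) 1)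
  match firstUp, firstDown with
  | some u, some d => max u d - 1
  | _, _ => -1

-- ===== PRECONDITION & SPEC =====
def Spec_ChangingSequence (arr : List Int) (out : Int) : Prop := out = ChangingSequence_alt arr
instance (arr : List Int) (out : Int) : Decidable (Spec_ChangingSequence arr out) := by unfold Spec_ChangingSequence; infer_instance

-- ===== CLAIM (what is proved, stated in full; the proofs are below) =====
def Claim_equal_ChangingSequence : Prop := ∀ (arr : List Int), Dom_ChangingSequence arr → Spec_ChangingSequence arr (ChangingSequence arr)

-- ===== LEMMAS AND PROOFS =====

-- a first-index result is an element of the scanned list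
theorem pvFirstIdx_mem {p : Int → Bool} : ∀ {l : List Int} {x : Int}, pvFirstIdx p l = some x → x ∈ l
  | j :: r, x, h => by
    simp only [pvFirstIdx] at h
    split at h
    · simp_all
    · exact List.mem_cons_of_mem j (pvFirstIdx_mem h)

-- with the "rise" flag already set, the loop returns (first fall index) - 1
theorem pvLoopA_inc (arr : List Int) (idxs : List Int) :
    pvLoopA arr idxs true false =
      (match pvFirstIdx (fun i => (PySem.List.pyGet? arr i).getD 0 < (PySem.List.pyGet? arr (i - 1)).getD 0) idxs with
       | some d => d - 1 | none => -1) := by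
  induction idxs with
  | nil => rfl
  | cons i rest ih =>
    simp only [pvLoopA, pvFirstIdx]
    by_cases hup : (PySem.List.pyGet? arr i).getD 0 > (PySem.List.pyGet? arr (i - 1)).getD 0
    · have hdn : ¬ (PySem.List.pyGet? arr i).getD 0 < (PySem.List.pyGet? arr (i - 1)).getD 0 := by omega
      simp [hup, hdn, ih]
    · by_cases hdn : (PySem.List.pyGet? arr i).getD 0 < (PySem.List.pyGet? arr (i - 1)).getD 0
      · simp [hup, hdn]
      · simp [hup, hdn, ih]

-- symmetric: with the "fall" flag already set, the loop returns (first rise index) - 1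
theorem pvLoopA_dec (arr : List Int) (idxs : List Int) :
    pvLoopA arr idxs false true =
      (match pvFirstIdx (fun i => (PySem.List.pyGet? arr i).getD 0 > (PySem.List.pyGet? arr (i - 1)).getD 0) idxs with
       | some u => u - 1 | none => -1) := by
  induction idxs with
  | nil => rfl
  | cons i rest ih =>
    simp only [pvLoopA, pvFirstIdx]
    by_cases hup : (PySem.List.pyGet? arr i).getD 0 > (PySem.List.pyGet? arr (i - 1)).getD 0
    · simp [hup]
    · by_cases hdn : (PySem.List.pyGet? arr i).getD 0 < (PySem.List.pyGet? arr (i - 1)).getD 0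
      · simp [hup, hdn, ih]
      · simp [hup, hdn, ih]

-- main loop invariant over a strictly increasing index list, flags both clear
theorem pvLoopA_main (arr : List Int) (idxs : List Int) (hs : idxs.Pairwise (· < ·)) :
    pvLoopA arr idxs false false =
      (match pvFirstIdx (fun i => (PySem.List.pyGet? arr i).getD 0 > (PySem.List.pyGet? arr (i - 1)).getD 0) idxs,
             pvFirstIdx (fun i => (PySem.List.pyGet? arr i).getD 0 < (PySem.List.pyGet? arr (i - 1)).getD 0) idxs with
       | some u, some d => max u d - 1 | _, _ => -1) := by
  induction idxs with
  | nil => rfl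
  | cons i rest ih =>
    have hlt : ∀ j ∈ rest, i < j := fun j hj => (List.pairwise_cons.mp hs).1 j hj
    have hs' : rest.Pairwise (· < ·) := (List.pairwise_cons.mp hs).2
    simp only [pvLoopA, pvFirstIdx]
    by_cases hup : (PySem.List.pyGet? arr i).getD 0 > (PySem.List.pyGet? arr (i - 1)).getD 0
    · have hdn : ¬ (PySem.List.pyGet? arr i).getD 0 < (PySem.List.pyGet? arr (i - 1)).getD 0 := by omega
      simp only [hup, hdn, if_pos, ite_false]
      rw [pvLoopA_inc arr rest]
      cases hfd : pvFirstIdx (fun i => (PySem.List.pyGet? arr i).getD 0 < (PySem.List.pyGet? arr (i - 1)).getD 0) rest with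
      | none => simp
      | some d =>
        have : i < d := hlt d (pvFirstIdx_mem hfd)
        simp [max_eq_right (le_of_lt this)]
    · by_cases hdn : (PySem.List.pyGet? arr i).getD 0 < (PySem.List.pyGet? arr (i - 1)).getD 0
      · simp only [hup, hdn, if_pos, ite_false]
        rw [pvLoopA_dec arr rest]
        cases hfu : pvFirstIdx (fun i => (PySem.List.pyGet? arr i).getD 0 > (PySem.List.pyGet? arr (i - 1)).getD 0) rest with
        | none => simp
        | some u =>
          have : i < u := hlt u (pvFirstIdx_mem hfu)
          simp [max_eq_left (le_of_lt this)]
      · simp [hup, hdn, ih hs']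

-- ===== VERDICT (by name: the statement is the Claim_ definition above) =====
theorem ChangingSequence_spec : Claim_equal_ChangingSequence := by
  intro arr _
  unfold Spec_ChangingSequence ChangingSequence ChangingSequence_alt
  exact pvLoopA_main arr _ (PySem.List.pairwise_lt_pyRange_one 1 (PySem.List.len arr))
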